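-- pv_equiv track=rewrite | github.com/microsoft/muzic | relyme/songmass_en/gen_at/1_Gen_L2M.py | separate_sentences
-- ===== SOURCE A (Python) =====
-- SEP = '[sep]'
--
-- def get_pitch_duration_structure(note_seq):
--     seq = []
--
--     #遍历寻找pitch-duration的结构
--     #当有不合法情况出现时，找最后一个pitch和第一个duration，保证其相邻
--     #p1 d1 p2 p3 d2 p4 d3-> p1 d1 p3 d1 p4 d3
--     #p1 d1 p2 d2 d3 p3 d4-> p1 d1 p2 d2 p3 d4
--     #p1 d1 p2 p3 d2 d3 p4 d4 -> p1 d1 p3 d2 p4 d4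
--
--     i = 0
--     while (i<len(note_seq)):
--         if note_seq[i] > 128:
--             #Duration
--             i += 1
--
--         else:
--             #Pitch
--             if i+1>=len(note_seq):
--                 #No Duration Followed
--                 break
--             if note_seq[i+1] <= 128:
--                 #Followed by a pitch
--                 i += 1
--                 continue
--
--
--             #Here trans back to str for bleu calculate
--             pitch = str(note_seq[i])
--             duration = str(note_seq[i+1])
--
--             seq.append(pitch)
--             seq.append(duration)
--             i += 2
--     return seq
--
-- def separate_sentences(x,find_structure = False):
--     lst = x.copy()
--     sep_positions = [i for i,x in enumerate(lst) if x==SEP]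
--     sep_positions.insert(0,-1)
--
--     ret = []
--     for i in range(len(sep_positions)-1):
--         sent = lst[sep_positions[i]+1:sep_positions[i+1]] #SZH: not include sep token
--         if find_structure:
--             sent = list(map(int, sent))
--             sent = get_pitch_duration_structure(sent)
--         ret.append(sent)
--     return ret
-- ===== SOURCE B (Python) =====
-- SEP = '[sep]'
--
--
-- def _pairs(ns):
--     # pitch-duration extraction as one index walk: emit (pitch, duration)
--     # when ns[i] <= 128 < ns[i+1], otherwise advance by one.
--     out = []
--     i = 0
--     while i + 1 < len(ns):
--         a, b = ns[i], ns[i + 1]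
--         if a > 128 or b <= 128:
--             i += 1
--         else:
--             out.append(str(a))
--             out.append(str(b))
--             i += 2
--     return out
--
--
-- def separate_sentences(x, find_structure=False):
--     # single linear scan with a running buffer; the buffer left over after
--     # the last separator is deliberately never flushed (matching A).
--     ret = []
--     buf = []
--     for t in x:
--         if t == SEP:
--             ret.append(_pairs([int(s) for s in buf]) if find_structure else buf)
--             buf = []
--         else:
--             buf.append(t)
--     return ret
-- ===== Notes on version B (the rewrite author's own statement) =====
-- stated objective: simpler
-- what changed: Replaces A's enumerate-based separator-position list, sentinel -1 insertion and index-pair slicing by a single linear scan that accumulates a buffer and flushes it at each '[sep]' (never flushing the leftover tail), with the pitch-duration walk folded into one two-sided condition.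
import Mathlib
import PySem

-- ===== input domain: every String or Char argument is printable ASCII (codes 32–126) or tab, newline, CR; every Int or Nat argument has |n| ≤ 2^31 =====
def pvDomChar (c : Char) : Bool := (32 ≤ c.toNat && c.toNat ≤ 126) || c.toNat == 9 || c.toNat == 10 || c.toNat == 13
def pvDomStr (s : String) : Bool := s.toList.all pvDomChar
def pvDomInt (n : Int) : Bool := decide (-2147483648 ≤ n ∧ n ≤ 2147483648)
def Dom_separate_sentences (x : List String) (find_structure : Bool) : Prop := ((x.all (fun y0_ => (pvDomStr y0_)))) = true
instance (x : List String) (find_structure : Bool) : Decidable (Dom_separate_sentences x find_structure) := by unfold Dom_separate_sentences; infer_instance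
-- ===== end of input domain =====

-- B replaces A's sep-position list plus slicing by a single buffer-accumulating scan (simpler decomposition);
-- return-value equivalence only (neither mutates its argument).

-- ===== PORT A =====
-- while-loop of get_pitch_duration_structure; appends become cons, 'break' returns the tail []
def gpdsA (ns : List Int) (i : Nat) : List String :=
  if h : i < ns.length then
    if ns[i]! > 128 then gpdsA ns (i + 1)                -- duration: i += 1
    else if ns.length ≤ i + 1 then []                    -- no duration followed: break
    else if ns[i+1]! ≤ 128 then gpdsA ns (i + 1)         -- followed by a pitch: i += 1
    else PySem.Int.toStr ns[i]! :: PySem.Int.toStr ns[i+1]! :: gpdsA ns (i + 2)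
  else []
termination_by ns.length - i
decreasing_by all_goals omega

def separate_sentences (x : List String) (find_structure : Bool) : List (List String) :=
  let lst := x                                           -- lst = x.copy()
  let spos : List Int := (PySem.List.enumerate lst 0).filterMap
      (fun p => if p.2 = "[sep]" then some p.1 else none)  -- [i for i,x in enumerate(lst) if x==SEP]
  let spos := (-1) :: spos                               -- sep_positions.insert(0,-1)
  (List.range (spos.length - 1)).map (fun i =>           -- for i in range(len(sep_positions)-1): ret.append(...)
    let sent := PySem.List.slice lst (some (spos[i]! + 1)) (some (spos[i+1]!))
    if find_structure then
      -- sent = list(map(int, sent)); Pre_ guarantees int() succeeds, so getD 0 is never the value used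
      gpdsA (sent.map (fun s => (PySem.Int.ofStr? s).getD 0)) 0
    else sent)

-- ===== PORT B =====
-- B's while-loop over an index pair
def pairsB (ns : List Int) (i : Nat) : List String :=
  if h : i + 1 < ns.length then
    if ns[i]! > 128 ∨ ns[i+1]! ≤ 128 then pairsB ns (i + 1)
    else PySem.Int.toStr ns[i]! :: PySem.Int.toStr ns[i+1]! :: pairsB ns (i + 2)
  else []
termination_by ns.length - i
decreasing_by all_goals omega

def flushB (find_structure : Bool) (buf : List String) : List String :=
  if find_structure then pairsB (buf.map (fun s => (PySem.Int.ofStr? s).getD 0)) 0 else buf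

def sepGoB (find_structure : Bool) : List String → List String → List (List String)
  | _buf, [] => []                                       -- leftover buffer deliberately dropped
  | buf, t :: rest =>
    if t = "[sep]" then flushB find_structure buf :: sepGoB find_structure [] rest
    else sepGoB find_structure (buf ++ [t]) rest

def separate_sentences_alt (x : List String) (find_structure : Bool) : List (List String) :=
  sepGoB find_structure [] x

-- ===== PRECONDITION & SPEC =====
-- Pre_ excludes only inputs where Python A raises ValueError: with find_structure=True, every token that
-- lies before some later '[sep]' (i.e. belongs to an emitted segment) and is not itself '[sep]' must parse as int().
def Pre_separate_sentences (x : List String) (find_structure : Bool) : Prop :=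
  find_structure = true →
    ∀ i < x.length, (∃ j < x.length, i < j ∧ x.getD j "" = "[sep]") →
      x.getD i "" ≠ "[sep]" → (PySem.Int.ofStr? (x.getD i "")).isSome = true

instance (x : List String) (find_structure : Bool) : Decidable (Pre_separate_sentences x find_structure) := by
  unfold Pre_separate_sentences; infer_instance

def pvWitness_separate_sentences : List String × Bool := (["60", "200", "[sep]", "oops"], true)

def Spec_separate_sentences (x : List String) (find_structure : Bool) (out : List (List String)) : Prop := out = separate_sentences_alt x find_structure
instance (x : List String) (find_structure : Bool) (out : List (List String)) : Decidable (Spec_separate_sentences x find_structure out) := by unfold Spec_separate_sentences; infer_instance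

-- ===== CLAIM (what is proved, stated in full; the proofs are below) =====
def Claim_equal_separate_sentences : Prop := ∀ (x : List String) (find_structure : Bool), Dom_separate_sentences x find_structure → Pre_separate_sentences x find_structure → Spec_separate_sentences x find_structure (separate_sentences x find_structure)

-- ===== LEMMAS AND PROOFS =====

-- A's int-of-token (Pre_ ensures the default is never the value used)
def toI (s : String) : Int := (PySem.Int.ofStr? s).getD 0

-- the per-segment transformation A applies
def gA (x : List String) (fs : Bool) (p q : Int) : List String :=
  let sent := PySem.List.slice x (some (p + 1)) (some q)
  if fs then gpdsA (sent.map toI) 0 else sent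

-- A's loop over consecutive position pairs
def pairGo (g : Int → Int → List String) : List Int → List (List String)
  | p :: q :: rest => g p q :: pairGo g (q :: rest)
  | _ => []

-- sep positions starting from index s
def posFrom (s : Int) : List String → List Int
  | [] => []
  | t :: r => if t = "[sep]" then s :: posFrom (s + 1) r else posFrom (s + 1) r

theorem pd_eq (ns : List Int) (i : Nat) : gpdsA ns i = pairsB ns i := by
  rw [gpdsA, pairsB]
  by_cases h1 : i < ns.length
  · by_cases h2 : ns[i]! > 128
    · by_cases h3 : i + 1 < ns.length
      · rw [dif_pos h1, dif_pos h3, if_pos h2, if_pos (Or.inl h2), pd_eq ns (i + 1)]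
      · rw [dif_pos h1, dif_neg h3, if_pos h2, pd_eq ns (i + 1), pairsB, dif_neg (by omega)]
    · by_cases h4 : ns.length ≤ i + 1
      · rw [dif_pos h1, dif_neg (by omega), if_neg h2, if_pos h4]
      · by_cases h5 : ns[i + 1]! ≤ 128
        · rw [dif_pos h1, dif_pos (by omega), if_neg h2, if_neg h4, if_pos h5,
            if_pos (Or.inr h5), pd_eq ns (i + 1)]
        · rw [dif_pos h1, dif_pos (by omega), if_neg h2, if_neg h4, if_neg h5,
            if_neg (by tauto), pd_eq ns (i + 2)]
  · rw [dif_neg h1, dif_neg (by omega)]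
termination_by ns.length - i
decreasing_by all_goals omega

theorem pairGo_range (g : Int → Int → List String) :
    ∀ l : List Int, (List.range (l.length - 1)).map (fun i => g l[i]! l[i+1]!) = pairGo g l := by
  intro l
  match l with
  | [] => rfl
  | [p] => rfl
  | p :: q :: rest =>
    have ih := pairGo_range g (q :: rest)
    simp only [List.length_cons, Nat.add_sub_cancel, List.range_succ_eq_map, List.map_cons,
      List.map_map, pairGo] at *
    congr 1

theorem enum_filterMap_posFrom : ∀ (l : List String) (s : Int),
    (PySem.List.enumerate l s).filterMap (fun p => if p.2 = "[sep]" then some p.1 else none)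
      = posFrom s l := by
  intro l
  induction l with
  | nil => intro s; rfl
  | cons t r ih =>
    intro s
    rw [PySem.List.enumerate_cons, List.filterMap_cons, posFrom]
    by_cases h : t = "[sep]" <;> simp [h, ih]

theorem A_char (x : List String) (fs : Bool) :
    separate_sentences x fs = pairGo (gA x fs) ((-1) :: posFrom 0 x) := by
  unfold separate_sentences
  dsimp only
  rw [enum_filterMap_posFrom]
  exact pairGo_range (gA x fs) ((-1) :: posFrom 0 x)

theorem posFrom_nosep : ∀ (l : List String) (s : Int), "[sep]" ∉ l → posFrom s l = [] := by
  intro l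
  induction l with
  | nil => intro s _; rfl
  | cons t r ih =>
    intro s h
    rw [posFrom]
    simp only [List.mem_cons, not_or] at h
    rw [if_neg (fun hh => h.1 hh.symm), ih _ h.2]

theorem posFrom_ge : ∀ (l : List String) (s : Int) (p : Int), p ∈ posFrom s l → s ≤ p := by
  intro l
  induction l with
  | nil => intro s p h; simp [posFrom] at h
  | cons t r ih =>
    intro s p h
    rw [posFrom] at h
    split_ifs at h with ht
    · rcases List.mem_cons.mp h with h | h
      · omega
      · have := ih _ _ h; omega
    · have := ih _ _ h; omega

theorem posFrom_shift : ∀ (l : List String) (s t : Int),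
    posFrom (s + t) l = (posFrom s l).map (· + t) := by
  intro l
  induction l with
  | nil => intro s t; rfl
  | cons a r ih =>
    intro s t
    rw [posFrom, posFrom]
    by_cases h : a = "[sep]"
    · rw [if_pos h, if_pos h, List.map_cons]
      have : s + t + 1 = (s + 1) + t := by omega
      rw [this, ih]
    · rw [if_neg h, if_neg h]
      have : s + t + 1 = (s + 1) + t := by omega
      rw [this, ih]

theorem posFrom_append_sep (pre suf : List String) (hpre : "[sep]" ∉ pre) : ∀ s : Int,
    posFrom s (pre ++ "[sep]" :: suf) = (s + pre.length) :: posFrom (s + pre.length + 1) suf := by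
  induction pre with
  | nil => intro s; simp [posFrom]
  | cons t r ih =>
    intro s
    simp only [List.mem_cons, not_or] at hpre
    rw [List.cons_append, posFrom, if_neg (fun hh => hpre.1 hh.symm), ih hpre.2]
    simp only [List.length_cons]
    push_cast
    congr 1
    · ring
    · congr 1
      ring

-- slices of the big list beyond pre ++ ["[sep]"] are slices of suf
theorem slice_shift (pre suf : List String) (p q : Int) (hp : -1 ≤ p) (hq : 0 ≤ q) :
    PySem.List.slice (pre ++ "[sep]" :: suf) (some (p + ((pre.length : Int) + 1) + 1)) (some (q + ((pre.length : Int) + 1)))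
      = PySem.List.slice suf (some (p + 1)) (some q) := by
  rw [PySem.List.slice_toNat (pre ++ "[sep]" :: suf) (by omega : (0:Int) ≤ p + ((pre.length : Int) + 1) + 1) (by omega),
      PySem.List.slice_toNat suf (by omega : (0:Int) ≤ p + 1) hq]
  have h1 : (p + ((pre.length : Int) + 1) + 1).toNat = (pre.length + 1) + (p + 1).toNat := by omega
  have h2 : (q + ((pre.length : Int) + 1)).toNat = (pre.length + 1) + q.toNat := by omega
  rw [h1, h2]
  have hdrop : (pre ++ "[sep]" :: suf).drop ((pre.length + 1) + (p + 1).toNat)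
      = suf.drop (p + 1).toNat := by
    have hsplit : pre ++ "[sep]" :: suf = (pre ++ ["[sep]"]) ++ suf := by simp
    have hlen : pre.length + 1 = (pre ++ ["[sep]"]).length := by simp
    rw [hsplit, hlen, List.drop_length_add_append]
  rw [hdrop]
  congr 1
  omega

theorem gA_shift (pre suf : List String) (fs : Bool) (p q : Int) (hp : -1 ≤ p) (hq : 0 ≤ q) :
    gA (pre ++ "[sep]" :: suf) fs (p + ((pre.length : Int) + 1)) (q + ((pre.length : Int) + 1))
      = gA suf fs p q := by
  unfold gA
  rw [slice_shift pre suf p q hp hq]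

theorem pairGo_shift (pre suf : List String) (fs : Bool) : ∀ ps : List Int,
    (∀ p ∈ ps, -1 ≤ p) → (∀ p ∈ ps.tail, 0 ≤ p) →
    pairGo (gA (pre ++ "[sep]" :: suf) fs) (ps.map (· + ((pre.length : Int) + 1)))
      = pairGo (gA suf fs) ps := by
  intro ps
  match ps with
  | [] => intro _ _; rfl
  | [p] => intro _ _; rfl
  | p :: q :: rest =>
    intro h1 h2
    simp only [List.map_cons, pairGo]
    have hq : 0 ≤ q := h2 q (by simp)
    congr 1
    · exact gA_shift pre suf fs p q (h1 p (by simp)) hq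
    · exact pairGo_shift pre suf fs (q :: rest)
        (fun r hr => by rcases List.mem_cons.mp hr with h | h; · omega
                        · exact h1 r (by simp [h]))
        (fun r hr => h2 r (List.mem_cons_of_mem q hr))

theorem sepGoB_nosep (fs : Bool) : ∀ (l : List String) (buf : List String),
    "[sep]" ∉ l → sepGoB fs buf l = [] := by
  intro l
  induction l with
  | nil => intro buf _; rfl
  | cons t r ih =>
    intro buf h
    simp only [List.mem_cons, not_or] at h
    rw [sepGoB, if_neg (fun hh => h.1 hh.symm), ih _ h.2]

theorem sepGoB_split (fs : Bool) (suf : List String) : ∀ (pre buf : List String),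
    "[sep]" ∉ pre →
    sepGoB fs buf (pre ++ "[sep]" :: suf) = flushB fs (buf ++ pre) :: sepGoB fs [] suf := by
  intro pre
  induction pre with
  | nil => intro buf _; simp [sepGoB]
  | cons t r ih =>
    intro buf h
    simp only [List.mem_cons, not_or] at h
    rw [List.cons_append, sepGoB, if_neg (fun hh => h.1 hh.symm), ih _ h.2]
    simp

theorem main_eq (x : List String) (fs : Bool) :
    separate_sentences x fs = separate_sentences_alt x fs := by
  by_cases hmem : "[sep]" ∈ x
  · obtain ⟨pre, suf, hx, hpre⟩ := List.eq_append_cons_of_mem hmem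
    subst hx
    -- A side
    rw [A_char]
    rw [posFrom_append_sep pre suf hpre 0]
    have h0 : (0 : Int) + pre.length = (pre.length : Int) := by omega
    rw [h0]
    have hsh : posFrom ((pre.length : Int) + 1) suf
        = (posFrom 0 suf).map (· + ((pre.length : Int) + 1)) := by
      conv_lhs => rw [show ((pre.length : Int) + 1) = 0 + ((pre.length : Int) + 1) from by omega]
      rw [posFrom_shift]
    rw [hsh]
    rw [pairGo]
    have hhead : gA (pre ++ "[sep]" :: suf) fs (-1) (pre.length : Int)
        = flushB fs pre := by
      unfold gA flushB
      dsimp only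
      have hsl : PySem.List.slice (pre ++ "[sep]" :: suf) (some ((-1 : Int) + 1)) (some (pre.length : Int))
          = pre := by
        rw [PySem.List.slice_toNat (pre ++ "[sep]" :: suf) (by omega) (by omega)]
        simp
      rw [hsl, pd_eq]
      rfl
    have hcons : ((pre.length : Int)) :: (posFrom 0 suf).map (· + ((pre.length : Int) + 1))
        = ((-1) :: posFrom 0 suf).map (· + ((pre.length : Int) + 1)) := by
      simp only [List.map_cons]
      congr 1
      omega
    rw [hhead, hcons]
    rw [pairGo_shift pre suf fs ((-1) :: posFrom 0 suf)
        (by intro p hp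
            rcases List.mem_cons.mp hp with h | h
            · omega
            · have := posFrom_ge suf 0 p h; omega)
        (by intro p hp; exact posFrom_ge suf 0 p hp)]
    rw [← A_char, main_eq suf fs]
    -- B side
    unfold separate_sentences_alt
    rw [sepGoB_split fs suf pre [] hpre, List.nil_append]
  · -- no separator: both return []
    rw [A_char, posFrom_nosep x 0 hmem]
    unfold separate_sentences_alt
    rw [sepGoB_nosep fs x [] hmem]
    rfl
termination_by x.length
decreasing_by simp [hx]; omega

-- ===== VERDICT (by name: the statement is the Claim_ definition above) =====
theorem separate_sentences_spec : Claim_equal_separate_sentences := by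
  intro x fs _ _
  unfold Spec_separate_sentences
  exact main_eq x fs
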